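-- pv_equiv track=rewrite | github.com/alzorix/homework | archive_data/Tasks/EX16/homework2/Lack_of_cognitive_abilities/7249.py | F
-- ===== SOURCE A (Python) =====
-- def F(n):
--     if n == 0:
--         return 1
--     else:
--         if n % 2 !=0:
--             return F(n // 8) * (n % 8)
--         else:
--             return F(n//8)
-- ===== SOURCE B (Python) =====
-- def F(n):
--     product = 1
--     for c in oct(n)[2:]:
--         d = int(c)
--         if d % 2:
--             product *= d
--     return product
-- ===== Notes on version B (the rewrite author's own statement) =====
-- stated objective: idiomatic
-- what changed: Replaced the recursion over n//8 by first rendering n in octal (oct(n)) and then a single forward pass over the digit characters multiplying the odd ones.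
import Mathlib
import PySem

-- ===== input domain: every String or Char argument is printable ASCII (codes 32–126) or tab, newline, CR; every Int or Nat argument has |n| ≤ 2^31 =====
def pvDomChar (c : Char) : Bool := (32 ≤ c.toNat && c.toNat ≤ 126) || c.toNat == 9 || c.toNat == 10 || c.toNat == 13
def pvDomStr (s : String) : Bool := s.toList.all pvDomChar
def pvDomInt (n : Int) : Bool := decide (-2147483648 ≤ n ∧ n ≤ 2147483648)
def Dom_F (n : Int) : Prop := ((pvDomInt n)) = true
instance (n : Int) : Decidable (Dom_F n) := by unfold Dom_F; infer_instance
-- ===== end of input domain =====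

-- B renders n in octal (oct(n)) and multiplies the odd digits in one forward pass instead of
-- A's recursion over n // 8 (idiomatic, same cost); Pre_ restricts to n ≥ 0 where A returns.

-- ===== PORT A =====
-- fuel only guarantees totality; on Pre_ (n ≥ 0) it is never exhausted
def Fgo (fuel : Nat) (n : Int) : Int :=
  match fuel with
  | 0 => 1
  | fuel + 1 =>
    if n = 0 then 1
    else if PySem.Int.mod n 2 ≠ 0 then Fgo fuel (PySem.Int.floordiv n 8) * PySem.Int.mod n 8
    else Fgo fuel (PySem.Int.floordiv n 8)

def F (n : Int) : Int := Fgo (n.toNat + 1) n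

-- ===== PORT B =====
-- oct(n)[2:] for n ≥ 0: the octal digits of n, most significant first (as Ints rather than chars;
-- int(c) on an octal digit char is exact). Fuel only guarantees totality.
def octDigits (fuel : Nat) (n : Int) : List Int :=
  match fuel with
  | 0 => []
  | fuel + 1 =>
    if n < 8 then [n]
    else octDigits fuel (PySem.Int.floordiv n 8) ++ [PySem.Int.mod n 8]

def F_alt (n : Int) : Int :=
  (octDigits (n.toNat + 1) n).foldl
    (fun product d => if PySem.Int.mod d 2 ≠ 0 then product * d else product) 1

-- ===== PRECONDITION & SPEC =====
-- Pre_ excludes negative n, on which Python A raises RecursionError (n//8 never reaches 0).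
def Pre_F (n : Int) : Prop := 0 ≤ n
instance (n : Int) : Decidable (Pre_F n) := by unfold Pre_F; infer_instance
def pvWitness_F : Int := 1234

def Spec_F (n : Int) (out : Int) : Prop := out = F_alt n
instance (n : Int) (out : Int) : Decidable (Spec_F n out) := by unfold Spec_F; infer_instance

-- ===== CLAIM (what is proved, stated in full; the proofs are below) =====
def Claim_equal_F : Prop := ∀ (n : Int), Dom_F n → Pre_F n → Spec_F n (F n)

-- ===== LEMMAS AND PROOFS =====

lemma div8_lt (n : Int) (h0 : 0 ≤ n) (hn : ¬ n < 8) :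
    (PySem.Int.floordiv n 8).toNat < n.toNat ∧ 0 ≤ PySem.Int.floordiv n 8 := by
  rw [PySem.Int.floordiv_eq_ediv_of_pos (by norm_num)]
  omega

-- the step function of B's fold
def bstep (product d : Int) : Int :=
  if PySem.Int.mod d 2 ≠ 0 then product * d else product

lemma Fgo_zero (f : Nat) : Fgo f 0 = 1 := by
  cases f <;> simp [Fgo]

lemma parity8 (n : Int) (h0 : 0 ≤ n) :
    (PySem.Int.mod (PySem.Int.mod n 8) 2 ≠ 0) ↔ (PySem.Int.mod n 2 ≠ 0) := by
  rw [PySem.Int.mod_eq_emod_of_pos (a := n) (by norm_num),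
      PySem.Int.mod_eq_emod_of_pos (by norm_num),
      PySem.Int.mod_eq_emod_of_pos (by norm_num)]
  omega

lemma main_lemma (k : Nat) : ∀ (n product : Int) (f g : Nat), 0 ≤ n → n.toNat ≤ k →
    n.toNat < f → n.toNat < g →
    (octDigits g n).foldl bstep product = product * Fgo f n := by
  induction k with
  | zero =>
    intro n product f g h0 hk hf hg
    have hn : n = 0 := by omega
    subst hn
    match f, g with
    | f + 1, g + 1 =>
      simp [octDigits, Fgo, bstep, PySem.Int.mod_eq_emod_of_pos (a := (0:Int)) (by norm_num : (0:Int) < 2)]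
  | succ k ih =>
    intro n product f g h0 hk hf hg
    match f, g with
    | f + 1, g + 1 =>
      by_cases hsmall : n < 8
      · -- one digit, n itself
        simp only [octDigits, if_pos hsmall, List.foldl_cons, List.foldl_nil, bstep]
        have hmod8 : PySem.Int.mod n 8 = n := by
          rw [PySem.Int.mod_eq_emod_of_pos (by norm_num)]; omega
        by_cases hz : n = 0
        · subst hz
          simp [Fgo, PySem.Int.mod_eq_emod_of_pos (a := (0:Int)) (by norm_num : (0:Int) < 2)]
        · simp only [Fgo, if_neg hz]
          have hdiv0 : PySem.Int.floordiv n 8 = 0 := by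
            rw [PySem.Int.floordiv_eq_ediv_of_pos (by norm_num)]; omega
          rw [hdiv0, Fgo_zero, hmod8]
          by_cases hodd : PySem.Int.mod n 2 ≠ 0 <;> simp [hodd] <;> ring
      · -- n ≥ 8: digits = digits (n/8) ++ [n%8]
        obtain ⟨hlt, hpos⟩ := div8_lt n h0 hsmall
        have hz : ¬ n = 0 := by omega
        simp only [octDigits, if_neg hsmall, List.foldl_append, List.foldl_cons, List.foldl_nil]
        rw [ih (PySem.Int.floordiv n 8) product f g hpos (by omega) (by omega) (by omega)]
        simp only [Fgo, if_neg hz, bstep]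
        by_cases hodd : PySem.Int.mod n 2 ≠ 0
        · rw [if_pos ((parity8 n h0).mpr hodd), if_pos hodd]; ring
        · rw [if_neg (fun h => hodd ((parity8 n h0).mp h)), if_neg hodd]

-- ===== VERDICT (by name: the statement is the Claim_ definition above) =====
theorem F_spec : Claim_equal_F := by
  intro n _ hpre
  unfold Spec_F F F_alt
  rw [show (fun product d => if PySem.Int.mod d 2 ≠ 0 then product * d else product) = bstep from rfl]
  rw [main_lemma n.toNat n 1 (n.toNat + 1) (n.toNat + 1) hpre le_rfl (by omega) (by omega)]
  ring
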